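-- pv_equiv track=rewrite | github.com/henry808/euler | 037/eul037.py | is_prime_rtol
-- ===== SOURCE A (Python) =====
-- from math import sqrt
--
-- def is_prime(n):
--     """returns True if n is a prime #
--     """
--     if n < 2:
--         return False
--     if n == 2:
--         return True
--     if n % 2 == 0:
--         return False
--     square_root = int(sqrt(n))
--     if [i for i in range(2, square_root + 1) if n % i == 0]:
--         return False
--     else:
--         return True
--
-- def is_prime_rtol(n):
--     """ n has to be a two or more digit #"""
--     shorter = str(n)[:-1]
--     if is_prime(int(shorter)):
--         if len(shorter) < 2:
--             return True
--         return is_prime_rtol(int(shorter))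
--     else:
--         return False
-- ===== SOURCE B (Python) =====
-- from math import sqrt
--
-- def is_prime(n):
--     """returns True if n is a prime #
--     """
--     if n < 2:
--         return False
--     if n == 2:
--         return True
--     if n % 2 == 0:
--         return False
--     i = 3
--     while i * i <= n:
--         if n % i == 0:
--             return False
--         i += 2
--     return True
--
-- def is_prime_rtol(n):
--     """ n has to be a two or more digit #"""
--     shorter = str(n)[:-1]
--     while True:
--         if not is_prime(int(shorter)):
--             return False
--         if len(shorter) < 2:
--             return True
--         shorter = str(int(shorter))[:-1]
-- ===== Notes on version B (the rewrite author's own statement) =====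
-- stated objective: faster
-- what changed: The recursive digit-truncation becomes an iterative while-loop over the shortened string, and the primality test replaces A's full list comprehension over range(2, sqrt+1) with an early-exit trial division over odd candidates only (i = 3, 5, ... while i*i <= n).
-- outside the precondition, e.g. on is_prime_rtol(9): A raises ValueError, B raises ValueError; on is_prime_rtol(-9): A raises ValueError, B raises ValueError
import Mathlib
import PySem

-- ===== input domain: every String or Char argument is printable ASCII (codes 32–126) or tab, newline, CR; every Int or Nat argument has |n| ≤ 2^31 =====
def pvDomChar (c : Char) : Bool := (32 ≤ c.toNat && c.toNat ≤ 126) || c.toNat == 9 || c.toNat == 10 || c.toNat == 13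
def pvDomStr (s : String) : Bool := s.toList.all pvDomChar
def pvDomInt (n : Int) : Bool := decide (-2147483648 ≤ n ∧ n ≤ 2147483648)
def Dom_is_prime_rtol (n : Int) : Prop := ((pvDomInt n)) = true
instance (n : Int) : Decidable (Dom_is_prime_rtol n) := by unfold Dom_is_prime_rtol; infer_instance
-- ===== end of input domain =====

-- B replaces A's recursive truncation by an iterative loop and A's full divisor-list
-- scan by an early-exit odd trial division; return value only, no side effects.

-- ===== PORT A =====
-- Port of is_prime: `int(sqrt(n))` is ported as Int.sqrt, exact for the |n| ≤ 2^31 domain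
-- (math.sqrt is correctly rounded and cannot cross an integer boundary at this size).
def pvIsPrimeA (n : Int) : Bool :=
  if n < 2 then false
  else if n = 2 then true
  else if PySem.Int.mod n 2 = 0 then false
  else
    let square_root : Int := Int.sqrt n
    if (PySem.List.pyRange 2 (square_root + 1) 1).filter
         (fun i => decide (PySem.Int.mod n i = 0)) ≠ [] then false
    else true

-- A's recursion; fuel = number of characters of str(n) bounds the recursion depth
-- (each level drops one digit); within Pre_ the fuel is never exhausted.
def pvRtolA : Nat → Int → Bool
  | 0, _ => false
  | fuel + 1, n =>
    let shorter : List Char := (PySem.Int.toChars n).dropLast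
    match PySem.Int.ofChars? shorter with
    | none => false   -- Python raises ValueError here (excluded by Pre_)
    | some m =>
      if pvIsPrimeA m then
        if shorter.length < 2 then true else pvRtolA fuel m
      else false

def is_prime_rtol (n : Int) : Bool := pvRtolA (PySem.Int.toChars n).length n

-- ===== PORT B =====
-- B's while loop `i = 3; while i*i <= n: …; i += 2` with i = 3 + 2*k (same values of i,
-- counter form only for termination).
def pvTrialFrom (n : Int) (k : Nat) : Bool :=
  if h : (3 + 2 * (k : Int)) * (3 + 2 * (k : Int)) ≤ n then
    if PySem.Int.mod n (3 + 2 * (k : Int)) = 0 then false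
    else pvTrialFrom n (k + 1)
  else true
termination_by (n + 1 - (3 + 2 * (k : Int)) * (3 + 2 * (k : Int))).toNat
decreasing_by
  have hsq : (3 + 2 * ((k : Int) + 1)) * (3 + 2 * ((k : Int) + 1))
      = (3 + 2 * (k : Int)) * (3 + 2 * (k : Int)) + (8 * (k : Int) + 16) := by ring
  push_cast
  omega

def pvIsPrimeB (n : Int) : Bool :=
  if n < 2 then false
  else if n = 2 then true
  else if PySem.Int.mod n 2 = 0 then false
  else pvTrialFrom n 0

-- B's `while True` loop over the state `shorter`; same fuel bound as A's recursion depth.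
def pvRtolB : Nat → List Char → Bool
  | 0, _ => false
  | fuel + 1, shorter =>
    match PySem.Int.ofChars? shorter with
    | none => false   -- Python raises ValueError here (excluded by Pre_)
    | some m =>
      if ! pvIsPrimeB m then false
      else if shorter.length < 2 then true
      else pvRtolB fuel (PySem.Int.toChars m).dropLast

def is_prime_rtol_alt (n : Int) : Bool :=
  pvRtolB (PySem.Int.toChars n).length (PySem.Int.toChars n).dropLast

-- ===== PRECONDITION & SPEC =====
-- Pre_ excludes -9 ≤ n ≤ 9, where Python's int(str(n)[:-1]) raises ValueError
-- (int('') or int('-')) in both A and B.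
def Pre_is_prime_rtol (n : Int) : Prop := 10 ≤ n ∨ n ≤ -10
instance (n : Int) : Decidable (Pre_is_prime_rtol n) := by unfold Pre_is_prime_rtol; infer_instance
def pvWitness_is_prime_rtol : Int := (23)

def Spec_is_prime_rtol (n : Int) (out : Bool) : Prop := out = is_prime_rtol_alt n
instance (n : Int) (out : Bool) : Decidable (Spec_is_prime_rtol n out) := by unfold Spec_is_prime_rtol; infer_instance

-- ===== CLAIM (what is proved, stated in full; the proofs are below) =====
def Claim_equal_is_prime_rtol : Prop := ∀ (n : Int), Dom_is_prime_rtol n → Pre_is_prime_rtol n → Spec_is_prime_rtol n (is_prime_rtol n)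

-- ===== LEMMAS AND PROOFS =====

-- characterization of B's trial loop
lemma pvTrialFrom_iff (n : Int) (k : Nat) :
    pvTrialFrom n k = true ↔
      ∀ j : Nat, k ≤ j → (3 + 2 * (j : Int)) * (3 + 2 * (j : Int)) ≤ n →
        PySem.Int.mod n (3 + 2 * (j : Int)) ≠ 0 := by
  fun_induction pvTrialFrom n k with
  | case1 k h hm =>
    exact iff_of_false (by simp) (fun H => H k le_rfl h hm)
  | case2 k h hm ih =>
    rw [ih]
    constructor
    · intro H j hkj hj
      rcases Nat.eq_or_lt_of_le hkj with rfl | hlt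
      · exact hm
      · exact H j hlt hj
    · intro H j hkj hj
      exact H j (Nat.le_of_succ_le hkj) hj
  | case3 k h =>
    simp only [true_iff]
    intro j hkj hj
    exfalso
    apply h
    refine le_trans ?_ hj
    have h1 : (3 + 2 * (k:Int)) ≤ 3 + 2 * (j:Int) := by omega
    nlinarith

-- sqrt bracket: for 0 ≤ n, m ≤ Int.sqrt n ↔ m*m ≤ n
lemma pv_le_sqrt (n : Int) (m : Nat) (hn : 0 ≤ n) :
    (m : Int) ≤ Int.sqrt n ↔ (m : Int) * (m : Int) ≤ n := by
  rw [Int.sqrt]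
  constructor
  · intro h
    have h1 : m ≤ Nat.sqrt n.toNat := by exact_mod_cast h
    have h0 := Nat.sqrt_le' n.toNat
    rw [pow_two] at h0
    have h2 : m * m ≤ n.toNat := le_trans (Nat.mul_le_mul h1 h1) h0
    omega
  · intro h
    have h2 : m ^ 2 ≤ n.toNat := by rw [pow_two]; omega
    have : m ≤ Nat.sqrt n.toNat := Nat.le_sqrt'.mpr h2
    exact_mod_cast this

-- the no-divisor conditions of the two tests agree (n odd, n ≥ 3)
lemma pv_nodiv_iff (n : Int) (h3 : 3 ≤ n) (hodd : ¬ PySem.Int.mod n 2 = 0) :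
    ((PySem.List.pyRange 2 (Int.sqrt n + 1) 1).filter
        (fun i => decide (PySem.Int.mod n i = 0)) = []) ↔ pvTrialFrom n 0 = true := by
  rw [List.filter_eq_nil_iff, pvTrialFrom_iff]
  simp only [PySem.List.mem_pyRange_one, decide_eq_true_eq, and_imp]
  constructor
  · intro H j _ hj
    have hle : ((3 + 2 * j : Nat) : Int) ≤ Int.sqrt n := by
      rw [pv_le_sqrt n (3 + 2 * j) (by omega)]
      push_cast
      exact hj
    push_cast at hle
    exact H (3 + 2 * (j : Int)) (by omega) (by omega)
  · intro H i h2i hlt hmod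
    have hdvd : i ∣ n := (PySem.Int.mod_eq_zero_iff_dvd n i).mp hmod
    rcases Int.even_or_odd i with ⟨c, hc⟩ | ⟨c, hc⟩
    · exact hodd ((PySem.Int.mod_eq_zero_iff_dvd n 2).mpr (dvd_trans ⟨c, by omega⟩ hdvd))
    · have hc1 : 1 ≤ c := by omega
      have hji : (3 + 2 * ((c - 1).toNat : Int)) = i := by omega
      have hsq : i * i ≤ n := by
        have := (pv_le_sqrt n i.toNat (by omega)).mp (by omega)
        have hit : ((i.toNat : Int)) = i := by omega
        rw [hit] at this
        nlinarith [this, (by omega : (0:Int) ≤ i), Int.sqrt_nonneg n]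
      exact H (c - 1).toNat (Nat.zero_le _) (by rw [hji]; exact hsq) (by rw [hji]; exact hmod)

-- the two primality tests agree everywhere
lemma pvIsPrime_eq (n : Int) : pvIsPrimeA n = pvIsPrimeB n := by
  unfold pvIsPrimeA pvIsPrimeB
  split_ifs with h1 h2 h3
  · rfl
  · rfl
  · rfl
  · dsimp only
    by_cases hfil : (PySem.List.pyRange 2 (Int.sqrt n + 1) 1).filter
        (fun i => decide (PySem.Int.mod n i = 0)) = []
    · rw [if_neg (not_not_intro hfil)]
      exact ((pv_nodiv_iff n (by omega) h3).mp hfil).symm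
    · rw [if_pos hfil]
      cases hb : pvTrialFrom n 0 with
      | false => rfl
      | true => exact absurd ((pv_nodiv_iff n (by omega) h3).mpr hb) hfil

-- the truncation loops agree for every fuel
lemma pvRtol_eq (fuel : Nat) (n : Int) :
    pvRtolA fuel n = pvRtolB fuel (PySem.Int.toChars n).dropLast := by
  induction fuel generalizing n with
  | zero => rfl
  | succ fuel ih =>
    rw [pvRtolA, pvRtolB]
    cases hp : PySem.Int.ofChars? (PySem.Int.toChars n).dropLast with
    | none => rfl
    | some m =>
      dsimp only
      rw [pvIsPrime_eq]
      cases hb : pvIsPrimeB m with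
      | false => simp
      | true =>
        simp only [Bool.not_true, Bool.false_eq_true, if_false]
        split_ifs <;> first | rfl | exact ih m

-- ===== VERDICT (by name: the statement is the Claim_ definition above) =====
theorem is_prime_rtol_spec : Claim_equal_is_prime_rtol := by
  intro n _ _
  unfold Spec_is_prime_rtol is_prime_rtol is_prime_rtol_alt
  exact pvRtol_eq _ n
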